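-- pv_equiv track=rewrite | github.com/pypi-data/pypi-mirror-392 | packages/nessus-plugin-hosts/nessus_plugin_hosts-2.0.6.tar.gz/nessus_plugin_hosts-2.0.6/HostInfo.py | likely_http_plugin
-- ===== SOURCE A (Python) =====
-- def likely_http_plugin(plugin_name: str) -> bool:
--     if not plugin_name:
--         return False
--     pn = plugin_name.lower()
--     return any(s in pn for s in [
--         'http', 'web application', 'cgi', 'apache', 'iis', 'nginx', 'tomcat', 'jetty',
--         'wordpress', 'drupal', 'joomla', 'servlet', 'web server', 'x-powered-by'
--     ])
-- ===== SOURCE B (Python) =====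
-- KEYWORDS = (
--     'http', 'web application', 'cgi', 'apache', 'iis', 'nginx', 'tomcat', 'jetty',
--     'wordpress', 'drupal', 'joomla', 'servlet', 'web server', 'x-powered-by'
-- )
--
-- def likely_http_plugin(plugin_name: str) -> bool:
--     s = plugin_name.lower()
--     for i in range(len(s)):
--         for kw in KEYWORDS:
--             if s.startswith(kw, i):
--                 return True
--     return False
-- ===== Notes on version B (the rewrite author's own statement) =====
-- stated objective: alternative
-- what changed: Replaces the keyword-major loop of 14 independent whole-string substring scans with a single position-major left-to-right sweep that at each index checks whether any keyword starts there (the pass a regex alternation automaton would make); the empty-string guard disappears because the sweep is vacuous on an empty name.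
import Mathlib
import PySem

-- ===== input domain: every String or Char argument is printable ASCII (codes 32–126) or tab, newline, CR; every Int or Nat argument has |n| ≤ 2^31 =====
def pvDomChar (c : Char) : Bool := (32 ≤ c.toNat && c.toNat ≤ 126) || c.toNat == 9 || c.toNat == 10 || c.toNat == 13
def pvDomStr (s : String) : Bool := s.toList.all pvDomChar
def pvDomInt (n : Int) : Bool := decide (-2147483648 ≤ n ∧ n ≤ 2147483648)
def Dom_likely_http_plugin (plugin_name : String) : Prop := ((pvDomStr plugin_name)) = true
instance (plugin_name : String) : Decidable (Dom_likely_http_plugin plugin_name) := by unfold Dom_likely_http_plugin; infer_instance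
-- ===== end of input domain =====

-- B replaces A's keyword-major independent substring scans by one position-major sweep
-- checking at each index whether some keyword starts there (objective: alternative).

-- ===== PORT A =====
def likely_http_plugin (plugin_name : String) : Bool :=
  if plugin_name = "" then false
  else
    let pn := PySem.Str.lower plugin_name
    (["http", "web application", "cgi", "apache", "iis", "nginx", "tomcat", "jetty",
      "wordpress", "drupal", "joomla", "servlet", "web server", "x-powered-by"] : List String).any
      (fun s => PySem.Str.isIn s pn)

-- ===== PORT B =====
-- module-level KEYWORDS tuple of Source B
def pvKeywordsB : List (List Char) :=
  ["http".toList, "web application".toList, "cgi".toList, "apache".toList, "iis".toList,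
   "nginx".toList, "tomcat".toList, "jetty".toList, "wordpress".toList, "drupal".toList,
   "joomla".toList, "servlet".toList, "web server".toList, "x-powered-by".toList]

-- s.startswith(kw, i) with 0 ≤ i (as every i from range(len(s)) is) is exactly
-- 'kw is a prefix of s[i:]', ported as PySem.Chars.startswith on (s.drop i.toNat).
def likely_http_plugin_alt (plugin_name : String) : Bool :=
  let s := PySem.Chars.lower plugin_name.toList
  (PySem.List.pyRange 0 (s.length : Int) 1).any (fun i =>
    pvKeywordsB.any (fun kw => PySem.Chars.startswith (s.drop i.toNat) kw))

-- ===== PRECONDITION & SPEC =====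
def Spec_likely_http_plugin (plugin_name : String) (out : Bool) : Prop := out = likely_http_plugin_alt plugin_name
instance (plugin_name : String) (out : Bool) : Decidable (Spec_likely_http_plugin plugin_name out) := by unfold Spec_likely_http_plugin; infer_instance

-- ===== CLAIM (what is proved, stated in full; the proofs are below) =====
def Claim_equal_likely_http_plugin : Prop := ∀ (plugin_name : String), Dom_likely_http_plugin plugin_name → Spec_likely_http_plugin plugin_name (likely_http_plugin plugin_name)

-- ===== LEMMAS AND PROOFS =====

-- For nonempty keywords, 'some keyword occurs somewhere in L' (A's order of scanning)
-- equals 'at some position of L some keyword starts' (B's order of scanning).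
lemma scan_eq (L : List Char) (kws : List (List Char)) (h : ∀ kw ∈ kws, kw ≠ []) :
    kws.any (fun kw => PySem.Chars.isIn kw L) =
    (PySem.List.pyRange 0 (L.length : Int) 1).any (fun i =>
      kws.any (fun kw => PySem.Chars.startswith (L.drop i.toNat) kw)) := by
  rw [Bool.eq_iff_iff]
  simp only [List.any_eq_true]
  constructor
  · rintro ⟨kw, hkw, hin⟩
    obtain ⟨j, hj⟩ := (PySem.Chars.exists_prefix_drop_iff_isIn kw L).mpr hin
    have hlt : j < L.length := by
      by_contra hge
      have hnil : L.drop j = [] := List.drop_eq_nil_of_le (by omega)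
      rw [hnil] at hj
      exact h kw hkw (List.prefix_nil.mp hj)
    refine ⟨(j : Int), ?_, kw, hkw, ?_⟩
    · rw [PySem.List.mem_pyRange_one]
      exact ⟨by positivity, by exact_mod_cast hlt⟩
    · rw [PySem.Chars.startswith_iff]
      simpa using hj
  · rintro ⟨i, _, kw, hkw, hsw⟩
    exact ⟨kw, hkw, (PySem.Chars.exists_prefix_drop_iff_isIn kw L).mp
      ⟨i.toNat, (PySem.Chars.startswith_iff _ _).mp hsw⟩⟩

-- ===== VERDICT (by name: the statement is the Claim_ definition above) =====
theorem likely_http_plugin_spec : Claim_equal_likely_http_plugin := by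
  intro p _
  unfold Spec_likely_http_plugin likely_http_plugin likely_http_plugin_alt
  by_cases hp : p = ""
  · subst hp; decide
  · rw [if_neg hp]
    simp only [PySem.Str.isIn_eq, PySem.Str.toList_lower]
    have hL : (["http", "web application", "cgi", "apache", "iis", "nginx", "tomcat", "jetty",
          "wordpress", "drupal", "joomla", "servlet", "web server", "x-powered-by"] : List String).any
          (fun s => PySem.Chars.isIn s.toList (PySem.Chars.lower p.toList)) =
        pvKeywordsB.any (fun kw => PySem.Chars.isIn kw (PySem.Chars.lower p.toList)) := by
      simp [pvKeywordsB, List.any_cons, List.any_nil]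
    rw [hL]
    exact scan_eq _ _ (by decide)
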